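-- pv_equiv track=rewrite | github.com/chunribu/manim-video | bioinfo/Hidden Markov Models/hmm.py | ss2path
-- ===== SOURCE A (Python) =====
-- def ss2path(state_series, start_index=0):
--     path = []
--     start = None
--     for i, s in enumerate(state_series):
--         if start:
--             end = (s, i + start_index)
--             path.append((start, end))
--             start = end
--         else:
--             start = (s, i + start_index)
--     return path
-- ===== SOURCE B (Python) =====
-- def ss2path(state_series, start_index=0):
--     xs = list(state_series)
--     n = len(xs)
--     if n < 2:
--         return []
--     mid = n // 2
--     bridge = ((xs[mid - 1], start_index + mid - 1), (xs[mid], start_index + mid))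
--     return (ss2path(xs[:mid], start_index)
--             + [bridge]
--             + ss2path(xs[mid:], start_index + mid))
-- ===== Notes on version B (the rewrite author's own statement) =====
-- stated objective: alternative
-- what changed: Replaces A's single left-to-right pass threading a running 'start' node through an accumulator with a divide-and-conquer: split the series at the midpoint, recurse on each half, and join the two edge lists with the single bridging edge across the split.
import Mathlib
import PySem

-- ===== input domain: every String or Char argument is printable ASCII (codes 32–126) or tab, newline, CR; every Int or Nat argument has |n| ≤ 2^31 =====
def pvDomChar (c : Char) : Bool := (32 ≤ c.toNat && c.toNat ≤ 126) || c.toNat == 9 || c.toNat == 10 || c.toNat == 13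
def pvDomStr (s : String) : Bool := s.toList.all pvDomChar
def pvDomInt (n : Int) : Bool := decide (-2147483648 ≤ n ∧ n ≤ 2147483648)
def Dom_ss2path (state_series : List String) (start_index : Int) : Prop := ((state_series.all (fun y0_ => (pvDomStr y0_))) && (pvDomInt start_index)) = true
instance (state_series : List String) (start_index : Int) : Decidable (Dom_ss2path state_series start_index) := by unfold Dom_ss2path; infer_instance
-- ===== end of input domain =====

-- B replaces A's single left-to-right pass (running 'start' node + accumulator) by a
-- divide-and-conquer: split at the midpoint, recurse on the halves, join with the
-- bridging edge. Objective: alternative (same result, different algorithm).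

-- ===== PORT A =====
-- 'if start:' — once assigned, start is a 2-tuple, which is always truthy in Python,
-- so the test is exactly 'start is not None': ported as the Option match below.
-- the loop body of A, named so the invariant lemma below can speak about it
def ss2pathStep (start_index : Int)
    (acc : List ((String × Int) × (String × Int)) × Option (String × Int))
    (is : Int × String) : List ((String × Int) × (String × Int)) × Option (String × Int) :=
  match acc.2 with
  | some start =>
      let e : String × Int := (is.2, is.1 + start_index)
      (acc.1 ++ [(start, e)], some e)
  | none => (acc.1, some (is.2, is.1 + start_index))

def ss2path (state_series : List String) (start_index : Int) : List ((String × Int) × (String × Int)) :=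
  let st := (PySem.List.enumerate state_series 0).foldl (ss2pathStep start_index) ([], none)
  st.1

-- ===== PORT B =====
-- Source B's slices xs[:mid] / xs[mid:] with 0 ≤ mid ≤ len are exactly take/drop;
-- xs[mid-1], xs[mid] are in range (1 ≤ mid < n), ported with getD.
-- The recursion is expressed structurally over a fuel = length bound (a pure
-- totality guard: with fuel ≥ length the guard never bites, proved in the lemmas).
def ss2pathAltGo : Nat → List String → Int → List ((String × Int) × (String × Int))
  | 0, _, _ => []
  | fuel + 1, xs, i =>
    if xs.length < 2 then []
    else
      let mid := xs.length / 2
      let bridge : (String × Int) × (String × Int) :=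
        ((xs.getD (mid - 1) "", i + (mid : Int) - 1), (xs.getD mid "", i + (mid : Int)))
      ss2pathAltGo fuel (xs.take mid) i ++ bridge :: ss2pathAltGo fuel (xs.drop mid) (i + (mid : Int))

def ss2path_alt (state_series : List String) (start_index : Int) : List ((String × Int) × (String × Int)) :=
  ss2pathAltGo state_series.length state_series start_index

-- ===== PRECONDITION & SPEC =====
def Spec_ss2path (state_series : List String) (start_index : Int) (out : List ((String × Int) × (String × Int))) : Prop := out = ss2path_alt state_series start_index
instance (state_series : List String) (start_index : Int) (out : List ((String × Int) × (String × Int))) : Decidable (Spec_ss2path state_series start_index out) := by unfold Spec_ss2path; infer_instance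

-- ===== CLAIM (what is proved, stated in full; the proofs are below) =====
def Claim_equal_ss2path : Prop := ∀ (state_series : List String) (start_index : Int), Dom_ss2path state_series start_index → Spec_ss2path state_series start_index (ss2path state_series start_index)

-- ===== LEMMAS AND PROOFS =====

-- canonical middle form: the list of consecutive edges, by structural recursion
def adjEdges : List String → Int → List ((String × Int) × (String × Int))
  | a :: b :: t, i => ((a, i), (b, i + 1)) :: adjEdges (b :: t) (i + 1)
  | _, _ => []

-- A's loop, once 'start' is set, appends exactly the canonical edges of (v's tail).
theorem ss2path_loop (start_index : Int) (l : List (Int × String))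
    (acc : List ((String × Int) × (String × Int))) (v : String × Int) :
    l.foldl (ss2pathStep start_index) (acc, some v)
    = (acc ++ (v :: l.map (fun is => (is.2, is.1 + start_index))).zip
          (l.map (fun is => (is.2, is.1 + start_index))),
       some ((l.map (fun is => (is.2, is.1 + start_index))).getLastD v)) := by
  induction l generalizing acc v with
  | nil => simp
  | cons x t ih =>
      simp only [List.foldl_cons, List.map_cons, ss2pathStep]
      rw [ih]
      simp only [List.zip_cons_cons, List.getLastD_cons, List.append_assoc,
        List.singleton_append]

-- the zip-of-enumerate form equals the canonical adjEdges form
theorem zip_enum_eq_adjEdges (xs : List String) (i k : Int) :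
    ((PySem.List.enumerate xs k).map (fun is => (is.2, is.1 + i))).zip
      (((PySem.List.enumerate xs k).map (fun is => (is.2, is.1 + i))).tail)
    = adjEdges xs (k + i) := by
  induction xs generalizing k with
  | nil => simp [PySem.List.enumerate_nil, adjEdges]
  | cons a t ih =>
      cases t with
      | nil => simp [PySem.List.enumerate_cons, PySem.List.enumerate_nil, adjEdges]
      | cons b u =>
          have h := ih (k + 1)
          simp only [PySem.List.enumerate_cons, List.map_cons, List.tail_cons] at h ⊢
          simp only [adjEdges, List.zip_cons_cons]
          rw [h, show k + 1 + i = k + i + 1 from by ring]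

-- A equals the canonical form
theorem ss2path_eq_adjEdges (xs : List String) (i : Int) :
    ss2path xs i = adjEdges xs i := by
  dsimp only [ss2path]
  cases xs with
  | nil => simp [PySem.List.enumerate_nil, adjEdges]
  | cons a t =>
      simp only [PySem.List.enumerate_cons, List.foldl_cons, ss2pathStep]
      rw [ss2path_loop i (PySem.List.enumerate t (0 + 1)) [] (a, 0 + i)]
      have h := zip_enum_eq_adjEdges (a :: t) i 0
      simp only [PySem.List.enumerate_cons, List.map_cons, List.tail_cons] at h
      simpa using h

-- splitting lemma for the canonical form: cutting at 1 ≤ m < len inserts the bridge edge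
theorem adjEdges_split (m : Nat) (xs : List String) (i : Int)
    (h1 : 1 ≤ m) (h2 : m < xs.length) :
    adjEdges xs i
    = adjEdges (xs.take m) i
      ++ ((xs.getD (m - 1) "", i + (m : Int) - 1), (xs.getD m "", i + (m : Int)))
        :: adjEdges (xs.drop m) (i + (m : Int)) := by
  induction m generalizing xs i with
  | zero => omega
  | succ n ih =>
      match xs, h2 with
      | a :: t, h2 =>
        cases n with
        | zero =>
            match t, h2 with
            | b :: u, _ =>
              simp [adjEdges]
        | succ n' =>
            have ht : n' + 1 < t.length := by simpa using h2
            have htne : t ≠ [] := by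
              cases t with
              | nil => simp at ht
              | cons _ _ => simp
            match t, ht, htne with
            | b :: u, ht, _ =>
              have key := ih (xs := b :: u) (i := i + 1) (by omega) ht
              simp only [Nat.add_sub_cancel, List.take_succ_cons, List.getD_cons_succ,
                List.drop_succ_cons] at key
              simp only [List.take_succ_cons, List.drop_succ_cons, List.getD_cons_succ,
                Nat.add_sub_cancel, adjEdges, List.cons_append]
              congr 1
              rw [key]
              push_cast
              ring_nf

-- B equals the canonical form (induction on the fuel, which bounds the length)
theorem ss2pathAltGo_eq_adjEdges (fuel : Nat) (xs : List String) (i : Int)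
    (hf : xs.length ≤ fuel) : ss2pathAltGo fuel xs i = adjEdges xs i := by
  induction fuel generalizing xs i with
  | zero =>
      match xs, hf with
      | [], _ => rfl
  | succ n ih =>
      rw [ss2pathAltGo]
      by_cases h : xs.length < 2
      · simp only [h, if_true]
        match xs, h with
        | [], _ => rfl
        | [a], _ => rfl
      · simp only [h, if_false]
        have h2 : 2 ≤ xs.length := by omega
        have hm1 : 1 ≤ xs.length / 2 := by omega
        have hm2 : xs.length / 2 < xs.length := by omega
        rw [ih (xs.take (xs.length / 2)) i (by simp only [List.length_take]; omega),
            ih (xs.drop (xs.length / 2)) (i + (xs.length / 2 : Nat)) (by simp only [List.length_drop]; omega)]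
        exact (adjEdges_split (xs.length / 2) xs i hm1 hm2).symm

-- ===== VERDICT (by name: the statement is the Claim_ definition above) =====
theorem ss2path_spec : Claim_equal_ss2path := by
  intro ss si _
  show ss2path ss si = ss2path_alt ss si
  rw [ss2path_eq_adjEdges, ss2path_alt, ss2pathAltGo_eq_adjEdges ss.length ss si le_rfl]
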